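-- pv_equiv track=rewrite | github.com/doglikevulturesBD/InnovationMentor | utils/trl_logic.py | calculate_trl
-- ===== SOURCE A (Python) =====
-- ALLOW_TRL_ZERO = True
--
-- def calculate_trl(answers: list[bool]) -> int:
--     """
--     Returns TRL = number of consecutive 'True' from the start.
--     Stops counting at first False.
--       []                  -> 0 (or 1 if ALLOW_TRL_ZERO=False)
--       [True]              -> 1
--       [True, True]        -> 2
--       [True, False, ...]  -> 1
--       [False, ...]        -> 0 (or 1 if ALLOW_TRL_ZERO=False)
--       [True x9]           -> 9
--     """
--     level = 0
--     for ans in answers: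
--         if ans:
--             level += 1
--         else:
--             break
--     if level == 0 and not ALLOW_TRL_ZERO:
--         return 1
--     return max(0, min(9, level))
-- ===== SOURCE B (Python) =====
-- ALLOW_TRL_ZERO = True
--
-- def calculate_trl(answers: list[bool]) -> int:
--     # Only the first nine answers can matter (the cap is 9).  The level equals
--     # the number of non-empty prefixes of that window that are entirely True,
--     # so sum an all() test over the staged prefixes -- no break, no clamping.
--     level = sum(all(answers[:k]) for k in range(1, min(9, len(answers)) + 1))
--     if level == 0 and not ALLOW_TRL_ZERO:
--         return 1
--     return level
-- ===== Notes on version B (the rewrite author's own statement) =====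
-- stated objective: alternative
-- what changed: Replaces the accumulate-and-break counting loop over the whole list with branch-free arithmetic on a fixed window: level = sum of the running ANDs of the first nine answers (no break, no min/max clamp needed since the window already bounds the result by 9).
import Mathlib
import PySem

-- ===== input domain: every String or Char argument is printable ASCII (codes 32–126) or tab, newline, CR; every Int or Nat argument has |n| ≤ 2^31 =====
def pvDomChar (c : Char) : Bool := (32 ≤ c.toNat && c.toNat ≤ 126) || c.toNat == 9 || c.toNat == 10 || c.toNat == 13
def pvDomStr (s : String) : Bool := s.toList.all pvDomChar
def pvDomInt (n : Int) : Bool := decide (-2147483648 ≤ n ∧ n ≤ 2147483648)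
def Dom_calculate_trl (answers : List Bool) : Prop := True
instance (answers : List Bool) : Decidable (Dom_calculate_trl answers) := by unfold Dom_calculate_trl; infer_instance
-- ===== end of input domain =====

-- B replaces the accumulate-and-break loop by arithmetic on a fixed window: it sums
-- an all() test over the nine staged prefixes, which removes the break and the clamp;
-- objective: alternative.

-- ===== PORT A =====
def pvAllowTrlZero : Bool := true

-- the for-loop with break: count while the element is true, stop at the first false
def pvLoopA : List Bool → Int → Int
  | [], level => level
  | a :: rest, level => if a then pvLoopA rest (level + 1) else level

def calculate_trl (answers : List Bool) : Int :=
  let level := pvLoopA answers 0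
  if level = 0 ∧ ¬ pvAllowTrlZero then 1
  else max 0 (min 9 level)

-- ===== PORT B =====
-- all(answers[:k])
def pvPrefixAll (answers : List Bool) (k : Int) : Bool :=
  (PySem.List.slice answers none (some k)).all (fun b => b)

def calculate_trl_alt (answers : List Bool) : Int :=
  let level : Int :=
    ((PySem.List.pyRange 1 (min 9 (answers.length : Int) + 1) 1).map
      (fun k => if pvPrefixAll answers k then (1 : Int) else 0)).sum
  if level = 0 ∧ ¬ pvAllowTrlZero then 1
  else level

-- ===== PRECONDITION & SPEC =====
def Spec_calculate_trl (answers : List Bool) (out : Int) : Prop := out = calculate_trl_alt answers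
instance (answers : List Bool) (out : Int) : Decidable (Spec_calculate_trl answers out) := by unfold Spec_calculate_trl; infer_instance

-- ===== CLAIM =====
def Claim_equal_calculate_trl : Prop := ∀ (answers : List Bool), Dom_calculate_trl answers → Spec_calculate_trl answers (calculate_trl answers)

-- ===== LEMMAS AND PROOFS =====
-- A's loop computes the length of the leading-True prefix
theorem pvLoopA_eq (xs : List Bool) (acc : Int) :
    pvLoopA xs acc = acc + ((xs.takeWhile (fun b => b)).length : Int) := by
  induction xs generalizing acc with
  | nil => simp [pvLoopA]
  | cons a rest ih =>
    cases a with
    | false => simp [pvLoopA, List.takeWhile]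
    | true => rw [pvLoopA, if_pos rfl, ih]; simp [List.takeWhile]; ring

-- a prefix inside the list is all-True iff it lies inside the leading-True prefix
theorem prefix_all_iff (xs : List Bool) (k : Nat) (hk : k ≤ xs.length) :
    ((xs.take k).all (fun b => b) = true) ↔ k ≤ (xs.takeWhile (fun b => b)).length := by
  induction xs generalizing k with
  | nil => simp at hk; simp [hk]
  | cons a rest ih =>
    cases k with
    | zero => simp
    | succ k' =>
      cases a with
      | false => simp [List.takeWhile]
      | true =>
        simp only [List.take_succ_cons, List.all_cons, List.takeWhile]
        simp [ih k' (by simpa using hk)]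

-- the 0/1-sum of the staged tests is the clamped count
theorem sum_staged (m c : Nat) :
    ((List.range m).map (fun j => if j + 1 ≤ c then (1 : Int) else 0)).sum
      = ((min m c : Nat) : Int) := by
  induction m with
  | zero => simp
  | succ m ih =>
    rw [List.range_succ, List.map_append, List.sum_append, ih]
    simp only [List.map_cons, List.map_nil, List.sum_cons, List.sum_nil]
    split_ifs with h
    · have : min (m + 1) c = min m c + 1 := by omega
      rw [this]; push_cast; ring
    · have : min (m + 1) c = min m c := by omega
      rw [this]; ring

-- ===== VERDICT =====
theorem calculate_trl_spec : Claim_equal_calculate_trl := by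
  intro answers _
  unfold Spec_calculate_trl calculate_trl calculate_trl_alt
  set c := (answers.takeWhile (fun b => b)).length with hc
  have hcle : c ≤ answers.length := (List.takeWhile_sublist _).length_le
  have hB :
      ((PySem.List.pyRange 1 (min 9 (answers.length : Int) + 1) 1).map
        (fun k => if pvPrefixAll answers k then (1 : Int) else 0)).sum
        = ((min (min 9 answers.length) c : Nat) : Int) := by
    rw [PySem.List.pyRange_one]
    have hm : ((min 9 (answers.length : Int) + 1 - 1).toNat) = min 9 answers.length := by
      omega
    rw [hm]
    have := sum_staged (min 9 answers.length) c
    rw [← this]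
    congr 1
    rw [List.map_map]
    apply List.map_congr_left
    intro j hj
    simp only [List.mem_range] at hj
    simp only [Function.comp]
    have hk : (1 : Int) + (j : Int) = ((j + 1 : Nat) : Int) := by push_cast; ring
    have hslice : PySem.List.slice answers none (some ((1 : Int) + j)) = answers.take (j + 1) := by
      rw [hk, PySem.List.slice_to_natCast]
    have hle : j + 1 ≤ answers.length := by omega
    rw [pvPrefixAll, hslice]
    by_cases h : (answers.take (j + 1)).all (fun b => b) = true
    · rw [if_pos h, if_pos ((prefix_all_iff answers (j + 1) hle).mp h)]
    · rw [if_neg h, if_neg (fun hle2 => h ((prefix_all_iff answers (j + 1) hle).mpr hle2))]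
  rw [hB, pvLoopA_eq]
  simp only [pvAllowTrlZero, zero_add]
  have : max 0 (min 9 (c : Int)) = ((min (min 9 answers.length) c : Nat) : Int) := by
    push_cast; omega
  simpa using this
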